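-- pv_equiv track=rewrite | github.com/MisD77/computationalMethods_pythonProjects | TheoSpectrum_linear_cyclic/theoretical_spectrum.py | linear_lists
-- ===== SOURCE A (Python) =====
-- def linear_lists(numbers):
--     linear_seq_list = [0]
--     for element in range(len(numbers)):
--         x = numbers[element]
--         linear_seq_list.append(x)
--         for i in range(element+1, len(numbers)):
--             x += numbers[i]
--             linear_seq_list.append(x)
--
--     linear_seq_list.sort()
--     return linear_seq_list
-- ===== SOURCE B (Python) =====
-- def linear_lists(numbers):
--     # Prefix-sum table, then pairwise differences P[j]-P[i] for i<j; sort.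
--     n = len(numbers)
--     s = 0
--     P = [0]
--     for v in numbers:
--         s += v
--         P.append(s)
--     results = [0]
--     for i in range(n):
--         for j in range(i + 1, n + 1):
--             results.append(P[j] - P[i])
--     results.sort()
--     return results
-- ===== Notes on version B (the rewrite author's own statement) =====
-- stated objective: alternative
-- what changed: B precomputes a prefix-sum table in one pass and emits each subarray sum as a difference P[j]-P[i] of two table entries, instead of A's re-accumulating a running sum inline in the inner loop.
import Mathlib
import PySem

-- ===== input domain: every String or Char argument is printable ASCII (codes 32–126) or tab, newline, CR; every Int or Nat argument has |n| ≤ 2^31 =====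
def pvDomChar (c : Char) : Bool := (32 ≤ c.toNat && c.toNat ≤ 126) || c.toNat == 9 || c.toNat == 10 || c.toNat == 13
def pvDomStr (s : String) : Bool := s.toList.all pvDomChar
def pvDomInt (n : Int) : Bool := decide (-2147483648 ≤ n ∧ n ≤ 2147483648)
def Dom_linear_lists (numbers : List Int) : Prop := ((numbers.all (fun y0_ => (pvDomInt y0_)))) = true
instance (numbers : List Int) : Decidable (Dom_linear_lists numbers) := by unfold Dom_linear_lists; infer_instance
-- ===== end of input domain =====

-- B replaces A's inline re-accumulation with a one-pass prefix-sum table and pairwise differences (alternative decomposition, same asymptotic cost).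

-- ===== PORT A =====
def linear_lists (numbers : List Int) : List Int :=
  let lst := (PySem.List.pyRange 0 (PySem.List.len numbers) 1).foldl
    (fun acc element =>
      let x := PySem.List.pyGetD numbers element 0
      let acc1 := acc ++ [x]
      ((PySem.List.pyRange (element + 1) (PySem.List.len numbers) 1).foldl
        (fun (st : Int × List Int) i =>
          let x' := st.1 + PySem.List.pyGetD numbers i 0
          (x', st.2 ++ [x'])) (x, acc1)).2) [0]
  PySem.List.sorted lst (fun v => v) false

-- ===== PORT B =====
def linear_lists_alt (numbers : List Int) : List Int :=
  let n := PySem.List.len numbers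
  let P := (numbers.foldl (fun (st : Int × List Int) v =>
      let s := st.1 + v
      (s, st.2 ++ [s])) (0, [0])).2
  let results := (PySem.List.pyRange 0 n 1).foldl
    (fun acc i =>
      (PySem.List.pyRange (i + 1) (n + 1) 1).foldl
        (fun acc2 j => acc2 ++ [PySem.List.pyGetD P j 0 - PySem.List.pyGetD P i 0]) acc) [0]
  PySem.List.sorted results (fun v => v) false

-- ===== PRECONDITION & SPEC =====
def Spec_linear_lists (numbers : List Int) (out : List Int) : Prop := out = linear_lists_alt numbers
instance (numbers : List Int) (out : List Int) : Decidable (Spec_linear_lists numbers out) := by unfold Spec_linear_lists; infer_instance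

-- ===== CLAIM (what is proved, stated in full; the proofs are below) =====
def Claim_equal_linear_lists : Prop := ∀ (numbers : List Int), Dom_linear_lists numbers → Spec_linear_lists numbers (linear_lists numbers)


-- ===== LEMMAS AND PROOFS =====

-- sum of the first k elements
def sumTo (xs : List Int) (k : Nat) : Int := (xs.take k).sum

-- A's inner running-sum loop, characterised as a map of prefix-sum differences
theorem innerA (xs : List Int) (e : Nat) :
    ∀ (m : Nat) (a : Int) (acc : List Int) (s : Int), 0 ≤ a → a.toNat ≤ xs.length →
    m = xs.length - a.toNat →
    s = sumTo xs a.toNat - sumTo xs e →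
    ((PySem.List.pyRange a (PySem.List.len xs) 1).foldl
      (fun (st : Int × List Int) i =>
        (st.1 + PySem.List.pyGetD xs i 0, st.2 ++ [st.1 + PySem.List.pyGetD xs i 0])) (s, acc)).2
    = acc ++ (PySem.List.pyRange a (PySem.List.len xs) 1).map
        (fun i => sumTo xs (i + 1).toNat - sumTo xs e) := by
  intro m
  induction m with
  | zero =>
    intro a acc s h0 hle hm hs
    have hba : (PySem.List.len xs) ≤ a := by
      simp [PySem.List.len]; omega
    rw [PySem.List.pyRange_one_eq_nil hba]
    simp
  | succ m ih =>
    intro a acc s h0 hle hm hs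
    have hlt : a < PySem.List.len xs := by
      simp [PySem.List.len]; omega
    rw [PySem.List.pyRange_one_cons hlt]
    have hx : PySem.List.pyGetD xs a 0 = xs[a.toNat]'(by omega) := by
      exact PySem.List.pyGetD_eq_getElem xs 0 h0 (by simpa [PySem.List.len] using hlt)
    have hstep : s + PySem.List.pyGetD xs a 0 = sumTo xs (a + 1).toNat - sumTo xs e := by
      have h1 : (a + 1).toNat = a.toNat + 1 := by omega
      rw [hx, hs, h1]
      have := List.sum_take_succ xs a.toNat (by omega)
      simp [sumTo] at this ⊢
      omega
    simp only [List.foldl_cons]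
    rw [ih (a + 1) (acc ++ [s + PySem.List.pyGetD xs a 0]) (s + PySem.List.pyGetD xs a 0)
        (by omega) (by omega) (by omega) hstep]
    simp [hstep]

-- B's prefix-table loop, characterised
theorem prefixB (xs : List Int) :
    ∀ (s : Int) (acc : List Int),
    (xs.foldl (fun (st : Int × List Int) v => (st.1 + v, st.2 ++ [st.1 + v])) (s, acc)).2
    = acc ++ (List.range xs.length).map (fun k => s + sumTo xs (k + 1)) := by
  induction xs with
  | nil => intro s acc; simp
  | cons v tl ih =>
    intro s acc
    simp only [List.foldl_cons]
    rw [ih (s + v) (acc ++ [s + v])]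
    simp only [List.length_cons, List.range_succ_eq_map, List.map_cons, List.map_map]
    simp [sumTo, Function.comp, add_assoc, List.take_succ_cons]

-- the prefix table is the map of sumTo over 0..n
theorem P_eq (xs : List Int) :
    (xs.foldl (fun (st : Int × List Int) v => (st.1 + v, st.2 ++ [st.1 + v])) (0, [0])).2
    = (List.range (xs.length + 1)).map (fun k => sumTo xs k) := by
  rw [prefixB xs 0 [0]]
  simp [List.range_succ_eq_map, List.map_map, Function.comp, sumTo]

theorem pyRange_shift (a b : Int) :
    PySem.List.pyRange (a + 1) (b + 1) 1 = (PySem.List.pyRange a b 1).map (· + 1) := by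
  rw [PySem.List.pyRange_one, PySem.List.pyRange_one]
  have : (b + 1 - (a + 1)) = b - a := by ring
  rw [this, List.map_map]
  apply List.map_congr_left
  intro k _
  simp [Function.comp]
  ring

-- lookups in the prefix table
theorem P_get (xs : List Int) (j : Int) (h0 : 0 ≤ j) (h1 : j ≤ xs.length) :
    PySem.List.pyGetD ((List.range (xs.length + 1)).map (fun k => sumTo xs k)) j 0
      = sumTo xs j.toNat := by
  rw [PySem.List.pyGetD_eq_getElem _ 0 h0 (by simp; omega)]
  simp

-- ===== VERDICT (by name: the statement is the Claim_ definition above) =====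
theorem linear_lists_spec : Claim_equal_linear_lists := by
  unfold Claim_equal_linear_lists Spec_linear_lists
  intro xs _
  simp only [linear_lists, linear_lists_alt]
  rw [P_eq xs]
  congr 1
  apply PySem.List.foldl_congr_mem
  intro acc e he
  obtain ⟨he0, hen⟩ := PySem.List.mem_pyRange_one.mp he
  have henN : e.toNat < xs.length := by simp [PySem.List.len] at hen; omega
  -- A side: first appended element, then the inner loop
  have hx : PySem.List.pyGetD xs e 0 = xs[e.toNat]'henN :=
    PySem.List.pyGetD_eq_getElem xs 0 he0 (by simpa [PySem.List.len] using hen)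
  have hs0 : PySem.List.pyGetD xs e 0 = sumTo xs (e + 1).toNat - sumTo xs e.toNat := by
    have h1 : (e + 1).toNat = e.toNat + 1 := by omega
    rw [hx, h1]
    have := List.sum_take_succ xs e.toNat henN
    simp [sumTo] at this ⊢
    omega
  rw [innerA xs e.toNat (xs.length - (e + 1).toNat) (e + 1)
      (acc ++ [PySem.List.pyGetD xs e 0]) (PySem.List.pyGetD xs e 0)
      (by omega) (by omega) rfl hs0]
  -- B side: the inner append loop is a map over the shifted range
  rw [PySem.List.foldl_append_singleton_eq_map
      (fun j => PySem.List.pyGetD ((List.range (xs.length + 1)).map (fun k => sumTo xs k)) j 0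
        - PySem.List.pyGetD ((List.range (xs.length + 1)).map (fun k => sumTo xs k)) e 0) _ acc]
  have hB : (PySem.List.pyRange (e + 1) (PySem.List.len xs + 1) 1).map
      (fun j => PySem.List.pyGetD ((List.range (xs.length + 1)).map (fun k => sumTo xs k)) j 0
        - PySem.List.pyGetD ((List.range (xs.length + 1)).map (fun k => sumTo xs k)) e 0)
      = [PySem.List.pyGetD xs e 0]
        ++ (PySem.List.pyRange (e + 1) (PySem.List.len xs) 1).map
            (fun i => sumTo xs (i + 1).toNat - sumTo xs e.toNat) := by
    rw [pyRange_shift e (PySem.List.len xs), List.map_map]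
    have hcons : PySem.List.pyRange e (PySem.List.len xs) 1
        = e :: PySem.List.pyRange (e + 1) (PySem.List.len xs) 1 :=
      PySem.List.pyRange_one_cons hen
    rw [hcons, List.map_cons]
    congr 1
    · simp only [Function.comp]
      rw [P_get xs (e + 1) (by omega) (by simp [PySem.List.len] at hen ⊢; omega),
          P_get xs e he0 (by simp [PySem.List.len] at hen ⊢; omega), hs0]
    · apply List.map_congr_left
      intro i hi
      obtain ⟨hi1, hi2⟩ := PySem.List.mem_pyRange_one.mp hi
      simp only [Function.comp]
      rw [P_get xs (i + 1) (by omega) (by simp [PySem.List.len] at hi2 ⊢; omega),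
          P_get xs e he0 (by simp [PySem.List.len] at hen ⊢; omega)]
  rw [hB]
  simp
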